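-- pv_equiv track=rewrite | github.com/MdAbedin/binarysearch | 0101 - 0200/0172 Reverse Words Sequel.py | solve
-- ===== SOURCE A (Python) =====
-- def solve(sentence, delimiters):
--     if not sentence:
--         return ""
--
--     i = 0
--     delimiters = set(delimiters)
--     words = []
--     delimiter_tokens = []
--
--     while i < len(sentence):
--         cur_token = []
--         is_delimiter = sentence[i] in delimiters
--         j = i
--
--         while j < len(sentence) and (sentence[j] in delimiters) == is_delimiter:
--             cur_token.append(sentence[j])
--             j += 1
--
--         if is_delimiter:
--             delimiter_tokens.append("".join(cur_token))
--         else: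
--             words.append("".join(cur_token))
--
--         i = j
--
--     words.reverse()
--
--     if sentence[0] in delimiters:
--         return "".join(delimiter_tokens[i//2] if i%2 == 0 else words[(i-1)//2] for i in range(len(words)+len(delimiter_tokens)))
--     else:
--         return "".join(words[i//2] if i%2 == 0 else delimiter_tokens[(i-1)//2] for i in range(len(words)+len(delimiter_tokens)))
-- ===== SOURCE B (Python) =====
-- def solve(sentence, delimiters):
--     d = set(delimiters)
--     pool = sentence[::-1]
--     n = len(sentence)
--     out = []
--     i = 0
--     j = 0  # pointer into pool: words are taken from the back of the sentence
--     while i < n: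
--         if sentence[i] in d:
--             out.append(sentence[i])
--             i += 1
--         else:
--             while j < n and pool[j] in d:
--                 j += 1
--             w = []
--             while j < n and pool[j] not in d:
--                 w.append(pool[j])
--                 j += 1
--             out.append("".join(reversed(w)))
--             while i < n and sentence[i] not in d:
--                 i += 1
--     return "".join(out)
-- ===== Notes on version B (the rewrite author's own statement) =====
-- stated objective: alternative
-- what changed: A tokenizes the sentence with a nested while loop into two separate token lists (words, delimiters), reverses the word list and rebuilds the output by parity-indexed interleaving over range(len); B builds no token lists at all: it runs two pointers, one copying delimiter characters of the sentence in place, the other walking a reversed copy of the sentence to hand each word slot the next word from the back.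
import Mathlib
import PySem

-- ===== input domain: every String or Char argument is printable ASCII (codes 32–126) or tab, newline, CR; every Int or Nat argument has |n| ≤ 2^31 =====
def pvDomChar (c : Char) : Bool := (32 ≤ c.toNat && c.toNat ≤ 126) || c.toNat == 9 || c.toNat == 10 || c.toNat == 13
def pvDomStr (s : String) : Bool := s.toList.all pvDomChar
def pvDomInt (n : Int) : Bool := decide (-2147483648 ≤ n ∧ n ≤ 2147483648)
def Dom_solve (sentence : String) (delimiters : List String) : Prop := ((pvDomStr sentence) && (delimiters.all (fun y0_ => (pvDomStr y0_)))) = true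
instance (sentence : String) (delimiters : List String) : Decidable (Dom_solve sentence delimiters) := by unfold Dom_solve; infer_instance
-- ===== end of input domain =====

-- B replaces A's tokenize-into-two-lists + parity-indexed interleave by a two-pointer scan:
-- delimiter characters are copied in place while a second pointer walks the reversed string
-- and supplies, for each word slot, the next word from the back (objective: alternative).

-- ===== PORT A =====
-- the outer while loop of A: each step peels one maximal run of same-class characters
def solveRunsA (p : Char → Bool) : List Char → List String → List String → List String × List String
  | [], words, dtoks => (words, dtoks)
  | c :: rest, words, dtoks =>
    let isD := p c
    let curToken := (c :: rest).takeWhile (fun x => p x == isD)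
    let rest' := (c :: rest).dropWhile (fun x => p x == isD)
    if isD then solveRunsA p rest' words (dtoks ++ [String.ofList curToken])
    else solveRunsA p rest' (words ++ [String.ofList curToken]) dtoks
termination_by cs => cs.length
decreasing_by
  all_goals
    simp only [List.dropWhile_cons, beq_self_eq_true, if_pos, List.length_cons]
    exact Nat.lt_succ_of_le (List.length_dropWhile_le _ rest)

def solve (sentence : String) (delimiters : List String) : String :=
  match sentence.toList with
  | [] => ""
  | c :: rest =>
    let dset : PySem.Set String := PySem.Set.ofList delimiters
    let p : Char → Bool := fun ch => PySem.Set.contains dset (String.ofList [ch])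
    let wd := solveRunsA p (c :: rest) [] []
    let words := wd.1.reverse
    let dtoks := wd.2
    let n : Int := (words.length : Int) + (dtoks.length : Int)
    if p c then
      PySem.Str.join "" ((PySem.List.pyRange 0 n 1).map (fun i =>
        if PySem.Int.mod i 2 == 0 then PySem.List.pyGetD dtoks (PySem.Int.floordiv i 2) ""
        else PySem.List.pyGetD words (PySem.Int.floordiv (i - 1) 2) ""))
    else
      PySem.Str.join "" ((PySem.List.pyRange 0 n 1).map (fun i =>
        if PySem.Int.mod i 2 == 0 then PySem.List.pyGetD words (PySem.Int.floordiv i 2) ""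
        else PySem.List.pyGetD dtoks (PySem.Int.floordiv (i - 1) 2) ""))

-- ===== PORT B =====
-- the outer while loop of Source B: the left pointer is the unconsumed suffix of the sentence,
-- the right pointer is the unconsumed suffix of the reversed sentence (the word pool);
-- a delimiter char is emitted as is, a word slot takes the next word from the pool
def goB (p : Char → Bool) : List Char → List Char → List String
  | [], _ => []
  | c :: rest, pool =>
    if p c then
      String.ofList [c] :: goB p rest pool
    else
      let pool1 := pool.dropWhile p
      let w := pool1.takeWhile (fun x => !p x)
      String.ofList w.reverse :: goB p ((c :: rest).dropWhile (fun x => !p x)) (pool1.dropWhile (fun x => !p x))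
termination_by cs _ => cs.length
decreasing_by
  · simp
  · simp only [List.dropWhile_cons, Bool.not_eq_eq_eq_not, Bool.not_true, *]
    simp only [if_pos, List.length_cons, *]
    exact Nat.lt_succ_of_le (List.length_dropWhile_le _ rest)

def solve_alt (sentence : String) (delimiters : List String) : String :=
  let dset : PySem.Set String := PySem.Set.ofList delimiters
  let p : Char → Bool := fun ch => PySem.Set.contains dset (String.ofList [ch])
  PySem.Str.join "" (goB p sentence.toList sentence.toList.reverse)

-- ===== PRECONDITION & SPEC =====
def Spec_solve (sentence : String) (delimiters : List String) (out : String) : Prop := out = solve_alt sentence delimiters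
instance (sentence : String) (delimiters : List String) (out : String) : Decidable (Spec_solve sentence delimiters out) := by unfold Spec_solve; infer_instance

-- ===== CLAIM (what is proved, stated in full; the proofs are below) =====
def Claim_equal_solve : Prop := ∀ (sentence : String) (delimiters : List String), Dom_solve sentence delimiters → Spec_solve sentence delimiters (solve sentence delimiters)

-- ===== LEMMAS AND PROOFS =====

-- the maximal-run decomposition, as one tagged token list
def tokRuns (p : Char → Bool) : List Char → List (List Char × Bool)
  | [] => []
  | c :: rest =>
    ((c :: rest).takeWhile (fun x => p x == p c), p c) ::
      tokRuns p ((c :: rest).dropWhile (fun x => p x == p c))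
termination_by cs => cs.length
decreasing_by
  simp only [List.dropWhile_cons, beq_self_eq_true, if_pos, List.length_cons]
  exact Nat.lt_succ_of_le (List.length_dropWhile_le _ rest)

def wordsOf (T : List (List Char × Bool)) : List String :=
  (T.filter (fun t => !t.2)).map (fun t => String.ofList t.1)

def dtoksOf (T : List (List Char × Bool)) : List String :=
  (T.filter (fun t => t.2)).map (fun t => String.ofList t.1)

theorem solveRunsA_eq (p : Char → Bool) (cs : List Char) (ws ds : List String) :
    solveRunsA p cs ws ds = (ws ++ wordsOf (tokRuns p cs), ds ++ dtoksOf (tokRuns p cs)) := by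
  fun_induction solveRunsA p cs ws ds with
  | case1 => simp [tokRuns, wordsOf, dtoksOf]
  | case2 c rest words dtoks isD curToken rest' hd ih =>
    rw [tokRuns, ih]
    simp only [wordsOf, dtoksOf, List.filter_cons]
    have hd' : p c = true := hd
    simp [hd, hd', rest', curToken]
  | case3 c rest words dtoks isD curToken rest' hd ih =>
    rw [tokRuns, ih]
    simp only [wordsOf, dtoksOf, List.filter_cons]
    have hd' : p c = false := eq_false_of_ne_true hd
    have hdi : isD = false := eq_false_of_ne_true hd
    simp [hdi, hd', rest', curToken]

theorem tokRuns_cons (p : Char → Bool) (y : Char) (ys : List Char) :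
    tokRuns p (y :: ys) = ((y :: ys).takeWhile (fun x => p x == p y), p y) ::
      tokRuns p ((y :: ys).dropWhile (fun x => p x == p y)) := by
  rw [tokRuns]

theorem dropWhile_head_false {q : Char → Bool} : ∀ {l : List Char} {y ys}, l.dropWhile q = y :: ys → q y = false := by
  intro l
  induction l with
  | nil => intro y ys h; simp [List.dropWhile] at h
  | cons a l ih =>
    intro y ys h
    by_cases ha : q a = true
    · exact ih (by simpa [List.dropWhile_cons, ha] using h)
    · have : a :: l = y :: ys := by simpa [List.dropWhile_cons, eq_false_of_ne_true ha] using h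
      cases this; exact eq_false_of_ne_true ha

theorem tokRuns_chain (p : Char → Bool) (cs : List Char) :
    (tokRuns p cs).IsChain (fun s t => s.2 ≠ t.2) := by
  fun_induction tokRuns p cs with
  | case1 => simp
  | case2 c rest ih =>
    rcases hd : (c :: rest).dropWhile (fun x => p x == p c) with _ | ⟨y, ys⟩
    · simp [tokRuns]
    · rw [tokRuns_cons, List.isChain_cons_cons]
      rw [hd, tokRuns_cons] at ih
      refine ⟨?_, ih⟩
      have := dropWhile_head_false hd
      simp at this ⊢
      exact fun e => this e.symm

theorem alt_counts : ∀ (T : List (List Char × Bool)), T.IsChain (fun s t => s.2 ≠ t.2) →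
    ∀ t ts, T = t :: ts →
    (t.2 = true → (wordsOf T).length ≤ (dtoksOf T).length ∧ (dtoksOf T).length ≤ (wordsOf T).length + 1)
    ∧ (t.2 = false → (dtoksOf T).length ≤ (wordsOf T).length ∧ (wordsOf T).length ≤ (dtoksOf T).length + 1) := by
  intro T
  induction T with
  | nil => intro _ t ts h; simp at h
  | cons t ts ih =>
    intro hch t' ts' he
    cases he
    rcases hts : ts with _ | ⟨u, us⟩
    · cases hb : t.2 <;> simp [wordsOf, dtoksOf, hb]
    · subst hts
      rw [List.isChain_cons_cons] at hch
      have hne := hch.1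
      have hih := ih hch.2 u us rfl
      cases hb : t.2 <;> cases hu : u.2 <;> rw [hb, hu] at hne <;> first
      | (exfalso; exact hne rfl)
      | (simp [wordsOf, dtoksOf, hb, hu] at hih ⊢
         omega)

-- the output token sequence as a function of the run list and the word supply
def walkL : List (List Char × Bool) → List String → List String
  | [], _ => []
  | t :: ts, ws => if t.2 then String.ofList t.1 :: walkL ts ws else ws.headD "" :: walkL ts ws.tail

def interleave : List String → List String → List String
  | [], _ => []
  | x :: xs, ys => x :: interleave ys xs
termination_by xs ys => xs.length + ys.length
decreasing_by simp; omega

theorem walkL_cons (t : List Char × Bool) (ts : List (List Char × Bool)) (ws : List String) :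
    walkL (t :: ts) ws = if t.2 then String.ofList t.1 :: walkL ts ws
      else ws.headD "" :: walkL ts ws.tail := rfl

theorem interleave_cons (x : String) (xs ys : List String) :
    interleave (x :: xs) ys = x :: interleave ys xs := by rw [interleave]

theorem walk_interleave : ∀ (T : List (List Char × Bool)), T.IsChain (fun s t => s.2 ≠ t.2) →
    ∀ R, R.length = (wordsOf T).length → ∀ t ts, T = t :: ts →
    walkL T R = if t.2 then interleave (dtoksOf T) R else interleave R (dtoksOf T) := by
  intro T
  induction T with
  | nil => intro _ _ _ t ts h; simp at h
  | cons t ts ih =>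
    intro hch R hR t' ts' he
    cases he
    rcases hts : ts with _ | ⟨u, us⟩
    · subst hts
      cases hb : t.2
      · simp [wordsOf, hb] at hR
        rcases R with _ | ⟨r, R'⟩
        · simp at hR
        · simp only [List.length_cons] at hR
          have : R' = [] := by simpa using hR
          subst this
          simp [walkL, hb, dtoksOf, interleave]
      · simp [wordsOf, hb] at hR
        subst hR
        simp [walkL, hb, dtoksOf, interleave]
    · subst hts
      rw [List.isChain_cons_cons] at hch
      have hne := hch.1
      cases hb : t.2
      · rw [hb] at hne
        have hu : u.2 = true := by
          cases h : u.2
          · rw [h] at hne; simp at hne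
          · rfl
        simp only [wordsOf, List.filter_cons, hb, Bool.not_false, if_pos, List.length_cons,
          List.map_cons] at hR
        rcases R with _ | ⟨r, R'⟩
        · simp at hR
        · have ihr := ih hch.2 R' (by simpa [wordsOf, List.filter_cons, hu] using hR) u us rfl
          rw [hu] at ihr; simp only [if_pos] at ihr
          rw [walkL_cons]
          simp only [hb, Bool.false_eq_true, if_false, List.headD_cons, List.tail_cons]
          rw [ihr]
          simp [dtoksOf, List.filter_cons, hb, interleave_cons]
      · rw [hb] at hne
        have hu : u.2 = false := by
          cases h : u.2
          · rfl
          · rw [h] at hne; simp at hne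
        simp only [wordsOf, List.filter_cons, hb, Bool.not_true, Bool.false_eq_true, if_false] at hR
        have ihr := ih hch.2 R (by simpa [wordsOf, List.filter_cons, hu] using hR) u us rfl
        rw [hu] at ihr; simp only [Bool.false_eq_true, if_false] at ihr
        rw [walkL_cons]
        simp only [hb, if_pos]
        rw [ihr]
        simp [dtoksOf, hb, hu, interleave_cons]

theorem range_parity_interleave : ∀ (n : Nat) (xs ys : List String), n = xs.length + ys.length →
    ys.length ≤ xs.length → xs.length ≤ ys.length + 1 →
    (List.range n).map (fun k => if k % 2 = 0 then xs.getD (k / 2) "" else ys.getD ((k - 1) / 2) "")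
      = interleave xs ys := by
  intro n
  induction n using Nat.strong_induction_on with
  | _ n ih =>
    intro xs ys hn h1 h2
    rcases xs with _ | ⟨x, xs'⟩
    · have : ys = [] := by simp at h1 ⊢; omega
      subst this
      simp at hn; subst hn
      simp [interleave]
    · rcases n with _ | m
      · exfalso; simp at hn; omega
      · rw [List.range_succ_eq_map, List.map_cons, List.map_map]
        have hhead : (if 0 % 2 = 0 then (x :: xs').getD (0 / 2) "" else ys.getD ((0 - 1) / 2) "") = x := by
          norm_num
        rw [hhead, interleave_cons]
        congr 1
        have hfun : ((fun k => if k % 2 = 0 then (x :: xs').getD (k / 2) "" else ys.getD ((k - 1) / 2) "") ∘ Nat.succ)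
            = (fun k => if k % 2 = 0 then ys.getD (k / 2) "" else xs'.getD ((k - 1) / 2) "") := by
          funext k
          simp only [Function.comp_apply, Nat.succ_eq_add_one]
          by_cases hk : k % 2 = 0
          · have h1' : ¬ ((k + 1) % 2 = 0) := by omega
            have h2' : (k + 1 - 1) / 2 = k / 2 := by omega
            simp [hk, h1']
          · have h1' : (k + 1) % 2 = 0 := by omega
            have h2' : (k + 1) / 2 = (k - 1) / 2 + 1 := by omega
            simp [hk, h1', h2']
        rw [hfun, ih m (by omega) ys xs' (by simp at hn ⊢; omega) (by simp at h2 ⊢; omega)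
          (by simp at h1 ⊢; omega)]

theorem map_pyRange_parity (xs ys : List String) :
    (PySem.List.pyRange 0 ((xs.length : Int) + (ys.length : Int)) 1).map
      (fun i => if PySem.Int.mod i 2 == 0 then PySem.List.pyGetD xs (PySem.Int.floordiv i 2) ""
        else PySem.List.pyGetD ys (PySem.Int.floordiv (i - 1) 2) "")
      = (List.range (xs.length + ys.length)).map
        (fun k => if k % 2 = 0 then xs.getD (k / 2) "" else ys.getD ((k - 1) / 2) "") := by
  have : ((xs.length : Int) + (ys.length : Int)) = ((xs.length + ys.length : Nat) : Int) := by push_cast; ring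
  rw [this, PySem.List.pyRange_zero_natCast, List.map_map]
  apply List.map_congr_left
  intro k _
  simp only [Function.comp_apply]
  by_cases hk : k % 2 = 0
  · have hm : PySem.Int.mod (↑k) 2 = 0 := by
      rw [PySem.Int.mod_eq_emod_of_pos (by norm_num)]; omega
    have hd : PySem.Int.floordiv (↑k) 2 = ((k / 2 : Nat) : Int) := by
      rw [PySem.Int.floordiv_eq_ediv_of_pos (by norm_num)]; omega
    rw [hm, hd]
    simp only [beq_self_eq_true, if_true, PySem.List.pyGetD_natCast]
    simp [hk]
  · have hm : PySem.Int.mod (↑k) 2 = 1 := by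
      rw [PySem.Int.mod_eq_emod_of_pos (by norm_num)]; omega
    have hd : PySem.Int.floordiv ((k : Int) - 1) 2 = (((k - 1) / 2 : Nat) : Int) := by
      rw [PySem.Int.floordiv_eq_ediv_of_pos (by norm_num)]; omega
    rw [hm, hd]
    have h10 : ((1 : Int) == 0) = false := by decide
    simp only [h10, if_false, Bool.false_eq_true, PySem.List.pyGetD_natCast]
    simp [hk]

-- A's output, expressed through walkL
theorem solve_eq_walkL (p : Char → Bool) (c : Char) (rest : List Char) :
    (if p c then
      PySem.Str.join "" ((PySem.List.pyRange 0
          (((solveRunsA p (c :: rest) [] []).1.reverse.length : Int) +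
            ((solveRunsA p (c :: rest) [] []).2.length : Int)) 1).map (fun i =>
        if PySem.Int.mod i 2 == 0 then
          PySem.List.pyGetD (solveRunsA p (c :: rest) [] []).2 (PySem.Int.floordiv i 2) ""
        else PySem.List.pyGetD (solveRunsA p (c :: rest) [] []).1.reverse (PySem.Int.floordiv (i - 1) 2) ""))
    else
      PySem.Str.join "" ((PySem.List.pyRange 0
          (((solveRunsA p (c :: rest) [] []).1.reverse.length : Int) +
            ((solveRunsA p (c :: rest) [] []).2.length : Int)) 1).map (fun i =>
        if PySem.Int.mod i 2 == 0 then
          PySem.List.pyGetD (solveRunsA p (c :: rest) [] []).1.reverse (PySem.Int.floordiv i 2) ""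
        else PySem.List.pyGetD (solveRunsA p (c :: rest) [] []).2 (PySem.Int.floordiv (i - 1) 2) "")))
    = PySem.Str.join "" (walkL (tokRuns p (c :: rest)) (wordsOf (tokRuns p (c :: rest))).reverse) := by
  generalize hT : tokRuns p (c :: rest) = T
  have hruns : solveRunsA p (c :: rest) [] [] = (wordsOf T, dtoksOf T) := by
    rw [solveRunsA_eq, hT]; simp
  have hchain : T.IsChain (fun s t => s.2 ≠ t.2) := hT ▸ tokRuns_chain p (c :: rest)
  have hcons : T = ((c :: rest).takeWhile (fun x => p x == p c), p c) ::
      tokRuns p ((c :: rest).dropWhile (fun x => p x == p c)) := hT ▸ tokRuns_cons p c rest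
  have hcounts := alt_counts T hchain _ _ hcons
  have hwalk := walk_interleave T hchain (wordsOf T).reverse (by simp) _ _ hcons
  have hwalk' : walkL T (wordsOf T).reverse =
      if p c then interleave (dtoksOf T) (wordsOf T).reverse
      else interleave (wordsOf T).reverse (dtoksOf T) := hwalk
  rw [hruns, hwalk']
  cases hpc : p c
  · simp only [Bool.false_eq_true, if_false]
    rw [show (((wordsOf T).reverse.length : Int) + ((dtoksOf T).length : Int))
        = (((wordsOf T).reverse.length : Int) + ((dtoksOf T).length : Int)) from rfl]
    rw [map_pyRange_parity ((wordsOf T).reverse) (dtoksOf T)]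
    rw [range_parity_interleave _ ((wordsOf T).reverse) (dtoksOf T) (by simp)
      (by simp [hpc] at hcounts; simp only [List.length_reverse]; omega)
      (by simp [hpc] at hcounts; simp only [List.length_reverse]; omega)]
  · simp only [if_true]
    rw [show (((wordsOf T).reverse.length : Int) + ((dtoksOf T).length : Int))
        = (((dtoksOf T).length : Int) + (((wordsOf T).reverse).length : Int)) from by ring]
    rw [map_pyRange_parity (dtoksOf T) ((wordsOf T).reverse)]
    rw [range_parity_interleave _ (dtoksOf T) ((wordsOf T).reverse) (by omega)
      (by simp [hpc] at hcounts; simp only [List.length_reverse]; omega)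
      (by simp [hpc] at hcounts; simp only [List.length_reverse]; omega)]

-- ===== run-list surgery lemmas for the B side =====

-- prepending a character to a run list
def consRun (p : Char → Bool) (T : List (List Char × Bool)) (c : Char) : List (List Char × Bool) :=
  match T with
  | [] => [([c], p c)]
  | (l, b) :: T' => if p c == b then (c :: l, b) :: T' else ([c], p c) :: (l, b) :: T'

-- appending a character to a run list
def snocRun (p : Char → Bool) (T : List (List Char × Bool)) (c : Char) : List (List Char × Bool) :=
  match T.getLast? with
  | none => [([c], p c)]
  | some (l, b) => if p c == b then T.dropLast ++ [(l ++ [c], b)] else T ++ [([c], p c)]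

theorem tokRuns_cons' (p : Char → Bool) (c : Char) (cs : List Char) :
    tokRuns p (c :: cs) = consRun p (tokRuns p cs) c := by
  rcases cs with _ | ⟨e, cs'⟩
  · simp [tokRuns, consRun]
  · rw [tokRuns_cons p e cs', consRun]
    by_cases hb : p c = p e
    · have hq : (fun x => p x == p c) = (fun x => p x == p e) := by funext x; rw [hb]
      rw [tokRuns_cons p c (e :: cs'), hq]
      simp [hb]
    · have hbe : (p e == p c) = false := by
        cases h : p e == p c
        · rfl
        · exact absurd (eq_of_beq h).symm hb
      have hcb : (p c == p e) = false := by
        cases h : p c == p e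
        · rfl
        · exact absurd (eq_of_beq h) hb
      rw [tokRuns_cons p c (e :: cs')]
      simp [hbe, hcb, tokRuns_cons p e cs']

theorem snocRun_cons (p : Char → Bool) (x : List Char × Bool) (r : List (List Char × Bool)) (c : Char)
    (h : r ≠ []) : snocRun p (x :: r) c = x :: snocRun p r c := by
  rcases r with _ | ⟨y, ys⟩
  · exact absurd rfl h
  · rw [snocRun, snocRun]
    simp only [List.getLast?_cons_cons]
    rcases hl : (y :: ys).getLast? with _ | ⟨l, b⟩
    · simp at hl
    · simp only [List.dropLast_cons_of_ne_nil (List.cons_ne_nil y ys)]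
      split <;> rfl

theorem consRun_snocRun_comm (p : Char → Bool) (T : List (List Char × Bool)) (c e : Char) :
    consRun p (snocRun p T c) e = snocRun p (consRun p T e) c := by
  rcases T with _ | ⟨⟨l1, b1⟩, T'⟩
  · cases hce : p e == p c
    · have hec : (p c == p e) = false := by
        cases h : p c == p e
        · rfl
        · rw [eq_of_beq h] at hce; simp at hce
      simp [snocRun, consRun, hce, hec]
    · have hec : (p c == p e) = true := by rw [eq_of_beq hce]; simp
      simp [snocRun, consRun, eq_of_beq hce]
  · rcases hT' : T' with _ | ⟨t2, T''⟩
    · -- one run: both operations touch it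
      subst hT'
      cases hc : p c == b1 <;> cases he : p e == b1 <;>
        simp [snocRun, consRun, hc, he, List.getLast?_singleton]
    · -- at least two runs: consRun touches the head, snocRun the last; they commute
      subst hT'
      rw [snocRun_cons p _ _ c (List.cons_ne_nil _ _), consRun, consRun]
      cases he : p e == b1
      · simp only [Bool.false_eq_true, if_false]
        rw [snocRun_cons p _ _ c (List.cons_ne_nil _ _),
          snocRun_cons p _ _ c (List.cons_ne_nil _ _)]
      · simp only [if_true]
        rw [snocRun_cons p _ _ c (List.cons_ne_nil _ _)]

theorem tokRuns_snoc (p : Char → Bool) (cs : List Char) (c : Char) :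
    tokRuns p (cs ++ [c]) = snocRun p (tokRuns p cs) c := by
  induction cs with
  | nil => simp [tokRuns, snocRun]
  | cons e cs' ih =>
    rw [List.cons_append, tokRuns_cons' p e (cs' ++ [c]), ih, consRun_snocRun_comm,
      ← tokRuns_cons']

def revRuns (T : List (List Char × Bool)) : List (List Char × Bool) :=
  (T.map (fun t => (t.1.reverse, t.2))).reverse

theorem snocRun_revRuns (p : Char → Bool) (T : List (List Char × Bool)) (c : Char) :
    snocRun p (revRuns T) c = revRuns (consRun p T c) := by
  rcases T with _ | ⟨⟨l, b⟩, T'⟩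
  · simp [revRuns, snocRun, consRun]
  · rw [consRun]
    simp only [revRuns, List.map_cons, List.reverse_cons]
    rw [snocRun]
    rcases hlast : ((T'.map (fun t => (t.1.reverse, t.2))).reverse ++ [(l.reverse, b)]).getLast? with _ | ⟨l2, b2⟩
    · simp at hlast
    · have : ((T'.map (fun t => (t.1.reverse, t.2))).reverse ++ [(l.reverse, b)]).getLast? = some (l.reverse, b) := by
        simp
      rw [this] at hlast
      cases hlast
      cases hcb : p c == b
      · simp [hcb]
      · simp [hcb, List.dropLast_append_of_ne_nil]

theorem tokRuns_reverse (p : Char → Bool) (cs : List Char) :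
    tokRuns p cs.reverse = revRuns (tokRuns p cs) := by
  induction cs with
  | nil => simp [tokRuns, revRuns]
  | cons c cs' ih =>
    rw [List.reverse_cons, tokRuns_snoc, ih, tokRuns_cons', snocRun_revRuns]

-- ===== word extraction from the pool =====

def wruns (p : Char → Bool) (q : List Char) : List (List Char) :=
  ((tokRuns p q).filter (fun t => !t.2)).map Prod.fst

theorem wruns_cons_delim (p : Char → Bool) (c : Char) (q : List Char) (hc : p c = true) :
    wruns p (c :: q) = wruns p q := by
  simp only [wruns]
  rw [tokRuns_cons' p c q]
  rcases hq : tokRuns p q with _ | ⟨⟨l, b⟩, T'⟩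
  · simp [consRun, hc]
  · rw [consRun]
    cases hb : b
    · subst hb
      simp [hc]
    · subst hb
      have h1 : (p c == true) = true := by simp [hc]
      simp [h1]

theorem beq_false_eq_not (p : Char → Bool) (c : Char) (hc : p c = false) :
    (fun x => p x == p c) = (fun x => !p x) := by
  funext x; rw [hc, beq_false]

theorem wruns_head (p : Char → Bool) (q : List Char) :
    (q.dropWhile p).takeWhile (fun x => !p x) = (wruns p q).headD [] := by
  induction q with
  | nil => simp [wruns, tokRuns]
  | cons c rest ih =>
    cases hc : p c
    · rw [List.dropWhile_cons_of_neg (by simp [hc])]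
      rw [wruns, tokRuns_cons p c rest, beq_false_eq_not p c hc]
      simp [hc]
    · rw [List.dropWhile_cons_of_pos hc, wruns_cons_delim p c rest hc]
      exact ih

theorem wruns_tail (p : Char → Bool) (q : List Char) :
    wruns p ((q.dropWhile p).dropWhile (fun x => !p x)) = (wruns p q).tail := by
  induction q with
  | nil => simp [wruns, tokRuns]
  | cons c rest ih =>
    cases hc : p c
    · rw [List.dropWhile_cons_of_neg (by simp [hc])]
      conv_rhs => rw [wruns, tokRuns_cons p c rest, beq_false_eq_not p c hc]
      simp only [List.filter_cons, hc, Bool.not_false, if_pos, List.map_cons, List.tail_cons]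
      rfl
    · rw [List.dropWhile_cons_of_pos hc, wruns_cons_delim p c rest hc]
      exact ih

-- ===== joining: everything at the character level =====

def flatOut (L : List String) : List Char := (L.map String.toList).flatten

theorem join_eq_flatOut (L : List String) : (PySem.Str.join "" L).toList = flatOut L := by
  rw [PySem.Str.toList_join]
  show PySem.Chars.join [] (L.map String.toList) = flatOut L
  rw [flatOut]
  generalize (L.map String.toList) = ls
  induction ls with
  | nil => rfl
  | cons a l ih =>
    cases l with
    | nil => simp [PySem.Chars.join, List.intercalate]
    | cons b m =>
      rw [PySem.Chars.join_cons_cons]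
      simp_all [List.flatten]

-- flatOut of walkL after prepending one delimiter character to the runs
theorem flatOut_walkL_consRun_delim (p : Char → Bool) (c : Char) (hc : p c = true)
    (T : List (List Char × Bool)) (ws : List String) :
    flatOut (walkL (consRun p T c) ws) = c :: flatOut (walkL T ws) := by
  rcases T with _ | ⟨⟨l, b⟩, T'⟩
  · simp [consRun, walkL, hc, flatOut]
  · rw [consRun]
    cases hb : b
    · have : (p c == false) = false := by simp [hc]
      simp [walkL_cons, hc, flatOut]
    · have h2 : (p c == true) = true := by simp [hc]
      simp [walkL_cons, hc, flatOut]

-- the core B lemma: goB's output characters are walkL's output characters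
theorem headD_toList (wl : List (List Char)) :
    ((wl.map (fun l => String.ofList l.reverse)).headD "").toList = (wl.headD []).reverse := by
  cases wl <;> simp

theorem goB_flat (p : Char → Bool) (cs q : List Char) :
    flatOut (goB p cs q) =
      flatOut (walkL (tokRuns p cs) ((wruns p q).map (fun l => String.ofList l.reverse))) := by
  fun_induction goB p cs q with
  | case1 pool => simp [tokRuns, walkL, flatOut]
  | case2 c rest pool hc ih =>
    rw [tokRuns_cons' p c rest, flatOut_walkL_consRun_delim p c hc, ← ih]
    simp [flatOut]
  | case3 c rest pool hc pool1 w ih =>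
    have hc' : p c = false := eq_false_of_ne_true hc
    rw [tokRuns_cons p c rest, beq_false_eq_not p c hc', walkL_cons]
    simp only [hc', Bool.false_eq_true, if_false]
    have hflat : ∀ (x : String) (L : List String), flatOut (x :: L) = x.toList ++ flatOut L := by
      intro x L; simp [flatOut]
    rw [hflat, hflat, headD_toList]
    have hw : w = (wruns p pool).headD [] := wruns_head p pool
    have htail : ((wruns p pool).map (fun l => String.ofList l.reverse)).tail
        = (wruns p (pool1.dropWhile (fun x => !p x))).map (fun l => String.ofList l.reverse) := by
      rw [wruns_tail p pool, List.map_tail]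
    rw [htail] at *
    rw [ih, hw]
    simp

-- the word supply fed from the reversed sentence is exactly the reversed word list
theorem wruns_reverse_map (p : Char → Bool) (cs : List Char) :
    (wruns p cs.reverse).map (fun l => String.ofList l.reverse)
      = (wordsOf (tokRuns p cs)).reverse := by
  rw [wruns, tokRuns_reverse, revRuns, wordsOf, List.filter_reverse, List.filter_map,
    List.map_reverse, List.map_reverse, List.map_map, List.map_map]
  congr 1
  have hf : ((fun (t : List Char × Bool) => !t.2) ∘ fun (t : List Char × Bool) => (t.1.reverse, t.2))
      = (fun t => !t.2) := by funext t; rfl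
  rw [hf]
  apply List.map_congr_left
  intro t _
  simp

theorem solve_core (p : Char → Bool) (c : Char) (rest : List Char) :
    (if p c then
      PySem.Str.join "" ((PySem.List.pyRange 0
          (((solveRunsA p (c :: rest) [] []).1.reverse.length : Int) +
            ((solveRunsA p (c :: rest) [] []).2.length : Int)) 1).map (fun i =>
        if PySem.Int.mod i 2 == 0 then
          PySem.List.pyGetD (solveRunsA p (c :: rest) [] []).2 (PySem.Int.floordiv i 2) ""
        else PySem.List.pyGetD (solveRunsA p (c :: rest) [] []).1.reverse (PySem.Int.floordiv (i - 1) 2) ""))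
    else
      PySem.Str.join "" ((PySem.List.pyRange 0
          (((solveRunsA p (c :: rest) [] []).1.reverse.length : Int) +
            ((solveRunsA p (c :: rest) [] []).2.length : Int)) 1).map (fun i =>
        if PySem.Int.mod i 2 == 0 then
          PySem.List.pyGetD (solveRunsA p (c :: rest) [] []).1.reverse (PySem.Int.floordiv i 2) ""
        else PySem.List.pyGetD (solveRunsA p (c :: rest) [] []).2 (PySem.Int.floordiv (i - 1) 2) "")))
    = PySem.Str.join "" (goB p (c :: rest) (c :: rest).reverse) := by
  apply String.toList_inj.mp
  rw [solve_eq_walkL p c rest, join_eq_flatOut, join_eq_flatOut, goB_flat, wruns_reverse_map]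

theorem solve_spec' (sentence : String) (delimiters : List String) :
    solve sentence delimiters = solve_alt sentence delimiters := by
  unfold solve solve_alt
  rcases h : sentence.toList with _ | ⟨c, rest⟩
  · apply String.toList_inj.mp
    simp [goB, PySem.Str.toList_join]
  · exact solve_core (fun ch => PySem.Set.contains (PySem.Set.ofList delimiters) (String.ofList [ch])) c rest

-- ===== VERDICT (by name: the statement is the Claim_ definition above) =====
theorem solve_spec : Claim_equal_solve := by
  intro s d _
  unfold Spec_solve
  exact solve_spec' s d
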